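-- pv_equiv track=rewrite | github.com/RaiderTcT/study | interview/interview_2.py | alien_to_human
-- ===== SOURCE A (Python) =====
-- def alien_to_human(n):
--     three = '3'
--     eight = '8'
--     l = 0
--     for i in range(1, n+1):
--         s = str(i)
--         if (three in s) or (eight in s):
--             continue
--         else:
--             l += 1
--     return l
-- ===== SOURCE B (Python) =====
-- def _good(m):
--     # all decimal digits of m avoid 3 and 8 (m >= 0)
--     if m % 10 in (3, 8):
--         return False
--     if m // 10 == 0:
--         return True
--     return _good(m // 10)
--
-- def _le_count(d):
--     # how many allowed digits are <= d
--     return sum(1 for x in (0, 1, 2, 4, 5, 6, 7, 9) if x <= d)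
--
-- def _count0(m):
--     # count of k in [0, m] all of whose decimal digits avoid 3 and 8
--     if m < 10:
--         return _le_count(m)
--     q, r = divmod(m, 10)
--     return _count0(q - 1) * 8 + (_le_count(r) if _good(q) else 0)
--
-- def alien_to_human(n):
--     if n < 1:
--         return 0
--     return _count0(n) - 1
-- ===== Notes on version B (the rewrite author's own statement) =====
-- stated objective: faster
-- what changed: Replaced the per-number loop that stringifies every i in 1..n with positional combinatorics (digit DP) over the 8 allowed digits, computing the count from the decimal digits of n alone.
import Mathlib
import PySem

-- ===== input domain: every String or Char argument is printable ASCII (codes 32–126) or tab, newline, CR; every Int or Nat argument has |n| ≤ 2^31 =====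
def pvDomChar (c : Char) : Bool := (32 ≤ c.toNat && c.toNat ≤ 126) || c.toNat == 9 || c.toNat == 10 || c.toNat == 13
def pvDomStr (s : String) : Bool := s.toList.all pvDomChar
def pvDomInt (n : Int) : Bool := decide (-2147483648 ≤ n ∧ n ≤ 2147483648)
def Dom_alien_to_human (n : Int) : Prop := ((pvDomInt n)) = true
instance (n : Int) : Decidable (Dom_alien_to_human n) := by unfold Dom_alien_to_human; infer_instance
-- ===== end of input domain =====

-- B replaces A's per-number string scan over 1..n by positional combinatorics (digit DP) on the
-- decimal digits of n over the 8 allowed digits; measured asymptotically faster (O(log n) vs O(n log n)).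


-- ===== PORT A =====
def alien_to_human (n : Int) : Int :=
  let three := "3"
  let eight := "8"
  let l : Int := 0
  (PySem.List.pyRange 1 (n + 1) 1).foldl
    (fun l i =>
      let s := PySem.Int.toStr i
      if PySem.Str.isIn three s || PySem.Str.isIn eight s then l else l + 1) l

-- ===== PORT B =====
-- The fuel parameter (first argument) of the two recursive helpers is a totality guard only:
-- it strictly exceeds the number being processed at every call, so it never runs out.

-- all decimal digits of m avoid 3 and 8 (m >= 0)
def pvGoodB : Nat → Int → Bool
  | 0, _ => false
  | fuel + 1, m =>
    if PySem.Int.mod m 10 = 3 ∨ PySem.Int.mod m 10 = 8 then false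
    else if PySem.Int.floordiv m 10 = 0 then true
    else pvGoodB fuel (PySem.Int.floordiv m 10)

-- how many allowed digits are <= d
def pvLeCountB (d : Int) : Int :=
  ([0, 1, 2, 4, 5, 6, 7, 9] : List Int).foldl (fun a x => if x ≤ d then a + 1 else a) 0

-- count of k in [0, m] all of whose decimal digits avoid 3 and 8
def pvCount0B : Nat → Int → Int
  | 0, _ => 0
  | fuel + 1, m =>
    if m < 10 then pvLeCountB m
    else
      let q := PySem.Int.floordiv m 10
      let r := PySem.Int.mod m 10
      pvCount0B fuel (q - 1) * 8 + (if pvGoodB fuel q then pvLeCountB r else 0)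

def alien_to_human_alt (n : Int) : Int :=
  if n < 1 then 0
  else pvCount0B (n.toNat + 1) n - 1

-- ===== PRECONDITION & SPEC =====
def Spec_alien_to_human (n : Int) (out : Int) : Prop := out = alien_to_human_alt n
instance (n : Int) (out : Int) : Decidable (Spec_alien_to_human n out) := by unfold Spec_alien_to_human; infer_instance

-- ===== CLAIM (what is proved, stated in full; the proofs are below) =====
def Claim_equal_alien_to_human : Prop := ∀ (n : Int), Dom_alien_to_human n → Spec_alien_to_human n (alien_to_human n)

-- ===== LEMMAS AND PROOFS =====

-- proof-side mirror of A's "digits of m" (Nat.toDigits without fuel)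
def pvDigits (m : Nat) : List Char :=
  if _h : m < 10 then [Nat.digitChar m]
  else pvDigits (m / 10) ++ [Nat.digitChar (m % 10)]
decreasing_by omega

-- proof-side mirror of pvGoodB on Nat
def pvGoodN (m : Nat) : Bool :=
  if m % 10 = 3 ∨ m % 10 = 8 then false
  else if h : m / 10 = 0 then true
  else pvGoodN (m / 10)
decreasing_by omega

-- allowed-digit predicate on Nat
def pvAllowed (b : Nat) : Bool := !(decide (b = 3 ∨ b = 8))

lemma toDigitsCore_eq_pvDigits (f m : Nat) (acc : List Char) (hf : m < f) :
    Nat.toDigitsCore 10 f m acc = pvDigits m ++ acc := by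
  induction f generalizing m acc with
  | zero => omega
  | succ f ih =>
    rw [pvDigits]
    simp only [Nat.toDigitsCore]
    by_cases h : m / 10 = 0
    · have hm : m < 10 := by omega
      simp [h, hm, Nat.mod_eq_of_lt hm]
    · have hm : ¬ m < 10 := by omega
      simp only [h, if_neg, hm, dif_neg, not_false_iff]
      rw [ih (m / 10) _ (by omega)]
      simp

lemma toDigits_eq_pvDigits (m : Nat) : Nat.toDigits 10 m = pvDigits m :=
  (toDigitsCore_eq_pvDigits (m + 1) m [] (by omega)).trans (by simp)

lemma digitChar_three (d : Nat) (hd : d < 10) : (Nat.digitChar d = '3') ↔ d = 3 := by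
  interval_cases d <;> simp [Nat.digitChar]

lemma digitChar_eight (d : Nat) (hd : d < 10) : (Nat.digitChar d = '8') ↔ d = 8 := by
  interval_cases d <;> simp [Nat.digitChar]

-- A's string test expressed through pvGoodN
lemma pvGoodN_iff_digits (m : Nat) :
    pvGoodN m = true ↔ ('3' ∉ pvDigits m ∧ '8' ∉ pvDigits m) := by
  induction m using pvDigits.induct with
  | case1 m h =>
    have h3 := digitChar_three m h
    have h8 := digitChar_eight m h
    rw [pvDigits, dif_pos h, pvGoodN, Nat.mod_eq_of_lt h, Nat.div_eq_of_lt h]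
    by_cases hbad : m = 3 ∨ m = 8
    · rw [if_pos hbad]
      simp only [List.mem_singleton]
      constructor
      · intro hc; cases hc
      · intro ⟨c3, c8⟩
        rcases hbad with hb | hb
        · exact (c3 (h3.mpr hb).symm).elim
        · exact (c8 (h8.mpr hb).symm).elim
    · rw [if_neg hbad, dif_pos rfl]
      simp only [List.mem_singleton, true_iff]
      constructor
      · intro hc; exact hbad (Or.inl (h3.mp hc.symm))
      · intro hc; exact hbad (Or.inr (h8.mp hc.symm))
  | case2 m h ih =>
    have hd : m % 10 < 10 := by omega
    have h3 := digitChar_three _ hd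
    have h8 := digitChar_eight _ hd
    have hz : ¬ m / 10 = 0 := by omega
    rw [pvDigits, dif_neg h, pvGoodN]
    by_cases hbad : m % 10 = 3 ∨ m % 10 = 8
    · rw [if_pos hbad]
      refine iff_of_false (by simp) ?_
      rintro ⟨c3, c8⟩
      rcases hbad with hb | hb
      · exact c3 (by rw [List.mem_append]; right; simp [h3.mpr hb])
      · exact c8 (by rw [List.mem_append]; right; simp [h8.mpr hb])
    · rw [if_neg hbad, dif_neg hz, ih]
      simp only [List.mem_append, List.mem_singleton, not_or]
      constructor
      · rintro ⟨c3, c8⟩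
        refine ⟨⟨c3, ?_⟩, ⟨c8, ?_⟩⟩
        · intro hc; exact hbad (Or.inl (h3.mp hc.symm))
        · intro hc; exact hbad (Or.inr (h8.mp hc.symm))
      · rintro ⟨⟨c3, _⟩, ⟨c8, _⟩⟩
        exact ⟨c3, c8⟩

-- bridge: B's good on Int agrees with pvGoodN on casts (given enough fuel)
lemma pvGoodB_natCast (fuel m : Nat) (h : m < fuel) : pvGoodB fuel (m : Int) = pvGoodN m := by
  induction fuel generalizing m with
  | zero => omega
  | succ fuel ih =>
    have h1 : PySem.Int.mod ((m : Nat) : Int) 10 = ((m % 10 : Nat) : Int) := PySem.Int.mod_natCast m 10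
    have h2 : PySem.Int.floordiv ((m : Nat) : Int) 10 = ((m / 10 : Nat) : Int) := PySem.Int.floordiv_natCast m 10
    rw [pvGoodN]
    simp only [pvGoodB]
    rw [h1, h2]
    by_cases hbad : m % 10 = 3 ∨ m % 10 = 8
    · rw [if_pos (by exact_mod_cast hbad), if_pos hbad]
    · rw [if_neg (by exact_mod_cast hbad), if_neg hbad]
      by_cases hz : m / 10 = 0
      · rw [if_pos (by exact_mod_cast hz), dif_pos hz]
      · rw [if_neg (by exact_mod_cast hz), dif_neg hz]
        exact ih (m / 10) (by omega)

-- digit decomposition of pvGoodN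
lemma pvGoodN_decomp (a b : Nat) (hb : b < 10) :
    pvGoodN (10 * a + b) = (pvAllowed b && pvGoodN a) := by
  have hmod : (10 * a + b) % 10 = b := by omega
  have hdiv : (10 * a + b) / 10 = a := by omega
  rw [pvGoodN, hmod, hdiv]
  by_cases hbad : b = 3 ∨ b = 8
  · simp [hbad, pvAllowed]
  · by_cases hz : a = 0
    · subst hz
      rw [if_neg hbad, dif_pos rfl]
      simp [pvAllowed, hbad, pvGoodN]
    · rw [if_neg hbad, dif_neg hz]
      simp [pvAllowed, hbad]

lemma pvGoodN_zero : pvGoodN 0 = true := by rw [pvGoodN]; simp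

lemma countP_digit_block (c : Bool) :
    (List.range 10).countP (fun b => pvAllowed b && c) = if c then 8 else 0 := by
  cases c <;> decide

-- block lemma: count of good numbers below 10*q
lemma countP_range_mul (q : Nat) :
    (List.range (10 * q)).countP (fun k => pvGoodN k) = 8 * (List.range q).countP (fun k => pvGoodN k) := by
  induction q with
  | zero => simp
  | succ q ih =>
    have h1 : 10 * (q + 1) = 10 * q + 10 := by ring
    rw [h1, List.range_add, List.countP_append, ih]
    have h2 : (List.map (fun x => 10 * q + x) (List.range 10)).countP (fun k => pvGoodN k)
        = (List.range 10).countP (fun b => pvAllowed b && pvGoodN q) := by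
      rw [List.countP_map]
      apply List.countP_congr
      intro b hb
      simp only [List.mem_range] at hb
      simp only [Function.comp_apply]
      rw [pvGoodN_decomp q b hb]
    rw [h2, countP_digit_block, List.range_succ, List.countP_append]
    cases h : pvGoodN q <;> simp [h] <;> ring

-- tail lemma: count of good numbers in [10*q, 10*q + r]
lemma countP_tail (q r : Nat) (hr : r < 10) :
    ((List.range (r + 1)).map (fun x => 10 * q + x)).countP (fun k => pvGoodN k)
      = if pvGoodN q then (List.range (r + 1)).countP (fun b => pvAllowed b) else 0 := by
  rw [List.countP_map]
  have h2 : ((List.range (r + 1)).countP ((fun k => pvGoodN k) ∘ (fun x => 10 * q + x)))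
      = (List.range (r + 1)).countP (fun b => pvAllowed b && pvGoodN q) := by
    apply List.countP_congr
    intro b hb
    simp only [List.mem_range] at hb
    simp only [Function.comp_apply]
    rw [pvGoodN_decomp q b (by omega)]
  rw [h2]
  cases h : pvGoodN q
  · simp
  · simp

-- single-digit values: pvGoodN is just the allowed-digit test
lemma pvGoodN_single (b : Nat) (hb : b < 10) : pvGoodN b = pvAllowed b := by
  have := pvGoodN_decomp 0 b hb
  simpa [pvGoodN_zero] using this

lemma pvLeCountB_natCast (r : Nat) (hr : r < 10) :
    pvLeCountB (r : Int) = ((List.range (r + 1)).countP (fun b => pvAllowed b) : Int) := by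
  interval_cases r <;> decide

-- main B lemma: pvCount0B counts good numbers in [0, m] (given enough fuel)
lemma pvCount0B_eq_countP (fuel m : Nat) (h : m < fuel) :
    pvCount0B fuel (m : Int) = ((List.range (m + 1)).countP (fun k => pvGoodN k) : Int) := by
  induction fuel generalizing m with
  | zero => omega
  | succ fuel ih =>
    by_cases hm : m < 10
    · simp only [pvCount0B]
      rw [if_pos (by exact_mod_cast hm), pvLeCountB_natCast m hm]
      congr 1
      apply List.countP_congr
      intro b hb
      simp only [List.mem_range] at hb
      rw [pvGoodN_single b (by omega)]
    · have h1 : PySem.Int.mod ((m : Nat) : Int) 10 = ((m % 10 : Nat) : Int) := PySem.Int.mod_natCast m 10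
      have h2 : PySem.Int.floordiv ((m : Nat) : Int) 10 = ((m / 10 : Nat) : Int) := PySem.Int.floordiv_natCast m 10
      simp only [pvCount0B]
      rw [if_neg (by exact_mod_cast hm), h1, h2]
      set q := m / 10 with hq
      set r := m % 10 with hrdef
      have hq1 : 1 ≤ q := by omega
      have hqm : q < m := by omega
      have hcast : ((q : Int) - 1) = ((q - 1 : Nat) : Int) := by omega
      rw [hcast, ih (q - 1) (by omega), pvGoodB_natCast fuel q (by omega),
        pvLeCountB_natCast r (by omega)]
      have hsub : (q - 1) + 1 = q := by omega
      rw [hsub]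
      have hsplit : m + 1 = 10 * q + (r + 1) := by omega
      have hra : List.range (10 * q + (r + 1))
          = List.range (10 * q) ++ (List.range (r + 1)).map (fun x => 10 * q + x) :=
        List.range_add
      rw [hsplit, hra, List.countP_append, countP_range_mul, countP_tail q r (by omega)]
      cases h : pvGoodN q <;> simp [h] <;> push_cast <;> ring

-- generic count lemma for A's fold
lemma foldl_count (p : Int → Bool) (xs : List Int) (a : Int) :
    xs.foldl (fun l i => if p i then l else l + 1) a = a + (xs.countP (fun i => !p i) : Int) := by
  induction xs generalizing a with
  | nil => simp
  | cons x xs ih =>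
    simp only [List.foldl_cons, List.countP_cons, ih]
    by_cases h : p x <;> simp [h] <;> push_cast <;> ring

-- A's per-element test, for positive i
lemma a_test_eq (i : Int) (hi : 1 ≤ i) :
    (!(PySem.Str.isIn "3" (PySem.Int.toStr i) || PySem.Str.isIn "8" (PySem.Int.toStr i)))
      = pvGoodN i.toNat := by
  have hchars : (PySem.Int.toStr i).toList = pvDigits i.toNat := by
    rw [PySem.Int.toList_toStr]
    unfold PySem.Int.toChars
    rw [if_neg (by omega)]
    have : i.natAbs = i.toNat := by omega
    rw [toDigits_eq_pvDigits]
  have h3 : PySem.Str.isIn "3" (PySem.Int.toStr i) = true ↔ '3' ∈ pvDigits i.toNat := by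
    rw [PySem.Str.isIn_iff_infix, hchars]
    exact List.singleton_infix_iff '3' _
  have h8 : PySem.Str.isIn "8" (PySem.Int.toStr i) = true ↔ '8' ∈ pvDigits i.toNat := by
    rw [PySem.Str.isIn_iff_infix, hchars]
    exact List.singleton_infix_iff '8' _
  cases hgd : pvGoodN i.toNat with
  | false =>
    have hnot : ¬ ('3' ∉ pvDigits i.toNat ∧ '8' ∉ pvDigits i.toNat) := by
      rw [← pvGoodN_iff_digits, hgd]; simp
    by_cases hc3 : '3' ∈ pvDigits i.toNat
    · rw [h3.mpr hc3]
      simp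
    · have hc8 : '8' ∈ pvDigits i.toNat := by tauto
      rw [h8.mpr hc8]
      simp
  | true =>
    have hgd' := (pvGoodN_iff_digits i.toNat).mp hgd
    have e3 : PySem.Str.isIn "3" (PySem.Int.toStr i) = false := by
      rw [Bool.eq_false_iff]; intro hc; exact hgd'.1 (h3.mp hc)
    have e8 : PySem.Str.isIn "8" (PySem.Int.toStr i) = false := by
      rw [Bool.eq_false_iff]; intro hc; exact hgd'.2 (h8.mp hc)
    rw [e3, e8]
    rfl

lemma pyRange_one_map (m : Nat) :
    PySem.List.pyRange 1 ((m : Int) + 1) 1 = (List.range m).map (fun (k : Nat) => ((k : Int) + 1)) := by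
  induction m with
  | zero => simp [PySem.List.pyRange_one_eq_nil]
  | succ m ih =>
    have h1 : ((m + 1 : Nat) : Int) + 1 = ((m : Int) + 1) + 1 := by push_cast; ring
    rw [h1, PySem.List.pyRange_one_succ_right (by omega), ih, List.range_succ, List.map_append]
    simp

-- ===== VERDICT (by name: the statement is the Claim_ definition above) =====
theorem alien_to_human_spec : Claim_equal_alien_to_human := by
  intro n _
  unfold Spec_alien_to_human alien_to_human alien_to_human_alt
  show (PySem.List.pyRange 1 (n + 1) 1).foldl
      (fun l i => if PySem.Str.isIn "3" (PySem.Int.toStr i) || PySem.Str.isIn "8" (PySem.Int.toStr i)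
        then l else l + 1) 0 = _
  by_cases hn : n < 1
  · rw [PySem.List.pyRange_one_eq_nil (by omega), if_pos hn]
    simp
  · rw [if_neg hn]
    set m := n.toNat with hm
    have hn' : n = (m : Int) := by omega
    rw [foldl_count (fun i => PySem.Str.isIn "3" (PySem.Int.toStr i) || PySem.Str.isIn "8" (PySem.Int.toStr i))]
    have htn : n.toNat = m := rfl
    rw [hn', pyRange_one_map, List.countP_map]
    have hfuel : ((m : Int).toNat + 1) = m + 1 := by omega
    rw [show ((m : Int).toNat + 1) = m + 1 from by omega] at *
    rw [pvCount0B_eq_countP (m + 1) m (by omega)]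
    have hcong : (List.range m).countP
          ((fun i => !(PySem.Str.isIn "3" (PySem.Int.toStr i) || PySem.Str.isIn "8" (PySem.Int.toStr i))) ∘ (fun (k : Nat) => ((k : Int) + 1)))
        = (List.range m).countP (fun k => pvGoodN (k + 1)) := by
      apply List.countP_congr
      intro k _
      simp only [Function.comp_apply]
      rw [a_test_eq ((k : Int) + 1) (by omega)]
      have hk : ((k : Int) + 1).toNat = k + 1 := by omega
      rw [hk]
    rw [hcong, List.range_succ_eq_map]
    simp only [List.countP_cons, List.countP_map, pvGoodN_zero, if_true]
    have hcc : (List.range m).countP ((fun k => pvGoodN k) ∘ Nat.succ)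
        = (List.range m).countP (fun k => pvGoodN (k + 1)) := rfl
    rw [hcc]
    push_cast
    ring
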